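-- pv_equiv track=rewrite | github.com/EdukronCodes/Gen-AI | Ai Projects/agentic_medical_chatbot/agents.py | assess_emergency_level
-- ===== SOURCE A (Python) =====
-- def assess_emergency_level(text: str) -> int:
--     """Assess emergency level on a 1-5 scale"""
--     text_lower = text.lower()
--
--     # Critical emergency keywords
--     critical_keywords = [
--         "chest pain", "heart attack", "stroke", "unconscious",
--         "not breathing", "severe bleeding", "seizure"
--     ]
--
--     # High emergency keywords
--     high_keywords = [
--         "difficulty breathing", "severe pain", "high fever",
--         "head injury", "broken bone", "allergic reaction"
--     ]
--
--     # Moderate emergency keywords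
--     moderate_keywords = [
--         "moderate pain", "persistent vomiting", "dehydration",
--         "dizziness", "fainting"
--     ]
--
--     if any(keyword in text_lower for keyword in critical_keywords):
--         return 5
--     elif any(keyword in text_lower for keyword in high_keywords):
--         return 4
--     elif any(keyword in text_lower for keyword in moderate_keywords):
--         return 3
--     else:
--         return 2
-- ===== SOURCE B (Python) =====
-- KEYWORD_LEVELS = {
--     "chest pain": 5, "heart attack": 5, "stroke": 5, "unconscious": 5,
--     "not breathing": 5, "severe bleeding": 5, "seizure": 5,
--     "difficulty breathing": 4, "severe pain": 4, "high fever": 4,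
--     "head injury": 4, "broken bone": 4, "allergic reaction": 4,
--     "moderate pain": 3, "persistent vomiting": 3, "dehydration": 3,
--     "dizziness": 3, "fainting": 3,
-- }
--
--
-- def assess_emergency_level(text: str) -> int:
--     """Assess emergency level on a 1-5 scale"""
--     t = text.lower()
--     best = 2
--     for i in range(len(t)):
--         for kw, level in KEYWORD_LEVELS.items():
--             if t[i:i + len(kw)] == kw:
--                 best = max(best, level)
--     return best
-- ===== Notes on version B (the rewrite author's own statement) =====
-- stated objective: alternative
-- what changed: Replaced A's tiered any-substring-search if/elif chain by a text-driven scan: one flat keyword->level table, a loop over every text position comparing the slice at that position against each keyword, and a running-max accumulator starting at 2.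
import Mathlib
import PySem

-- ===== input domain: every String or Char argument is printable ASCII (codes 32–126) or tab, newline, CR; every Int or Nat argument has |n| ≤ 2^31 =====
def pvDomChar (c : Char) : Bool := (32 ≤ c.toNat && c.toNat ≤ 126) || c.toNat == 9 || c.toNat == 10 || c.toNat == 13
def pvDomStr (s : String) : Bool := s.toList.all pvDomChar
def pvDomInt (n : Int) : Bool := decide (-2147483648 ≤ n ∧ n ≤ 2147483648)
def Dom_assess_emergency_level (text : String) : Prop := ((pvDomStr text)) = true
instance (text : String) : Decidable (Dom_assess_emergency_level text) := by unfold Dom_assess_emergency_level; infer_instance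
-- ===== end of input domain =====

-- B replaces A's tiered if/elif any-substring chain by a text-driven position scan over one flat keyword->level table with a running-max accumulator; alternative decomposition, same result.


-- ===== PORT A =====
def aCriticalKeywords : List String :=
  ["chest pain", "heart attack", "stroke", "unconscious",
   "not breathing", "severe bleeding", "seizure"]

def aHighKeywords : List String :=
  ["difficulty breathing", "severe pain", "high fever",
   "head injury", "broken bone", "allergic reaction"]

def aModerateKeywords : List String :=
  ["moderate pain", "persistent vomiting", "dehydration",
   "dizziness", "fainting"]

def assess_emergency_level (text : String) : Int :=
  let text_lower := PySem.Str.lower text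
  if aCriticalKeywords.any (fun keyword => PySem.Str.isIn keyword text_lower) then 5
  else if aHighKeywords.any (fun keyword => PySem.Str.isIn keyword text_lower) then 4
  else if aModerateKeywords.any (fun keyword => PySem.Str.isIn keyword text_lower) then 3
  else 2

-- ===== PORT B =====
-- the module-level dict KEYWORD_LEVELS, as an association list in insertion order
def bKeywordLevels : List (String × Int) :=
  [("chest pain", 5), ("heart attack", 5), ("stroke", 5), ("unconscious", 5),
   ("not breathing", 5), ("severe bleeding", 5), ("seizure", 5),
   ("difficulty breathing", 4), ("severe pain", 4), ("high fever", 4),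
   ("head injury", 4), ("broken bone", 4), ("allergic reaction", 4),
   ("moderate pain", 3), ("persistent vomiting", 3), ("dehydration", 3),
   ("dizziness", 3), ("fainting", 3)]

def assess_emergency_level_alt (text : String) : Int :=
  let t := PySem.Str.lower text
  (PySem.List.pyRange 0 (PySem.Str.len t) 1).foldl (fun best i =>
    bKeywordLevels.foldl (fun best p =>
      if PySem.Str.slice t (some i) (some (i + PySem.Str.len p.1)) == p.1
      then max best p.2 else best) best) 2

-- ===== PRECONDITION & SPEC =====
def Spec_assess_emergency_level (text : String) (out : Int) : Prop := out = assess_emergency_level_alt text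
instance (text : String) (out : Int) : Decidable (Spec_assess_emergency_level text out) := by unfold Spec_assess_emergency_level; infer_instance

-- ===== CLAIM (what is proved, stated in full; the proofs are below) =====
def Claim_equal_assess_emergency_level : Prop := ∀ (text : String), Dom_assess_emergency_level text → Spec_assess_emergency_level text (assess_emergency_level text)

-- ===== LEMMAS AND PROOFS =====

lemma pvFoldl_mono {α : Type} (f : Int → α → Int) (h : ∀ b x, b ≤ f b x) :
    ∀ (l : List α) (b : Int), b ≤ l.foldl f b := by
  intro l
  induction l with
  | nil => intro b; simp
  | cons x xs ih => intro b; exact le_trans (h b x) (ih (f b x))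

lemma pvFoldl_le {α : Type} (f : Int → α → Int) (c : Int) :
    ∀ (l : List α) (b : Int), (∀ b' x, x ∈ l → b' ≤ c → f b' x ≤ c) → b ≤ c → l.foldl f b ≤ c := by
  intro l
  induction l with
  | nil => intro b _ hb; simpa using hb
  | cons x xs ih =>
    intro b h hb
    exact ih (f b x) (fun b' y hy => h b' y (List.mem_cons_of_mem _ hy))
      (h b x (List.mem_cons_self) hb)

lemma pvFoldl_ge {α : Type} (f : Int → α → Int) (v : Int) (hmono : ∀ b x, b ≤ f b x) :
    ∀ (l : List α) (b : Int) (x : α), x ∈ l → (∀ b', v ≤ f b' x) → v ≤ l.foldl f b := by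
  intro l
  induction l with
  | nil => intro b x hx; exact absurd hx (List.not_mem_nil)
  | cons y ys ih =>
    intro b x hx hv
    rcases List.mem_cons.mp hx with rfl | hx'
    · exact le_trans (hv b) (pvFoldl_mono f hmono ys (f b x))
    · exact ih (f b y) x hx' hv

-- the slice comparison at position i succeeds iff the keyword is a prefix of t.drop i
lemma pvMatch_iff (t k : String) (i : Int) (h0 : 0 ≤ i) :
    (PySem.Str.slice t (some i) (some (i + PySem.Str.len k)) == k) = true ↔
      k.toList <+: t.toList.drop i.toNat := by
  obtain ⟨j, rfl⟩ : ∃ j : Nat, i = (j : Int) := ⟨i.toNat, (Int.toNat_of_nonneg h0).symm⟩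
  rw [beq_iff_eq, ← String.toList_inj, PySem.Str.toList_slice,
    PySem.Chars.slice_eq_listSlice]
  simp only [PySem.Str.len_eq]
  rw [PySem.List.slice_natCast_add, Int.toNat_natCast]
  constructor
  · intro h; exact h ▸ List.take_prefix _ _
  · intro h
    rcases h with ⟨s, hs⟩
    rw [← hs, List.take_left']
    rfl

lemma pvTier_iff (L : List String) (hne : ∀ k ∈ L, k.toList ≠ []) (t : String) :
    (L.any (fun k => PySem.Str.isIn k t)) = true ↔
      ∃ i, i ∈ PySem.List.pyRange 0 (PySem.Str.len t) 1 ∧ ∃ k ∈ L,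
        (PySem.Str.slice t (some i) (some (i + PySem.Str.len k)) == k) = true := by
  rw [List.any_eq_true]
  constructor
  · rintro ⟨k, hk, hin⟩
    rw [PySem.Str.isIn_iff_infix, ← PySem.Chars.isIn_iff_infix,
      ← PySem.Chars.exists_prefix_drop_iff_isIn] at hin
    rcases hin with ⟨j, hj⟩
    have hjlt : j < t.toList.length := by
      by_contra hge
      rw [List.drop_eq_nil_of_le (by omega)] at hj
      exact hne k hk (List.prefix_nil.mp hj)
    refine ⟨(j : Int), ?_, k, hk, ?_⟩
    · rw [PySem.List.mem_pyRange_one]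
      constructor
      · exact Int.natCast_nonneg j
      · simp only [PySem.Str.len_eq]
        exact_mod_cast hjlt
    · rw [pvMatch_iff t k _ (Int.natCast_nonneg j), Int.toNat_natCast]
      exact hj
  · rintro ⟨i, hi, k, hk, hm⟩
    rw [PySem.List.mem_pyRange_one] at hi
    rw [pvMatch_iff t k i hi.1] at hm
    refine ⟨k, hk, ?_⟩
    rw [PySem.Str.isIn_iff_infix, ← PySem.Chars.isIn_iff_infix,
      ← PySem.Chars.exists_prefix_drop_iff_isIn]
    exact ⟨i.toNat, hm⟩

-- inner-loop step facts
lemma pvStep_mono (t : String) (i : Int) :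
    ∀ (b : Int) (p : String × Int),
      b ≤ (if PySem.Str.slice t (some i) (some (i + PySem.Str.len p.1)) == p.1
           then max b p.2 else b) := by
  intro b p
  split
  · exact le_max_left _ _
  · exact le_rfl

lemma pvInner_mono (t : String) : ∀ (b : Int) (i : Int),
    b ≤ bKeywordLevels.foldl (fun best p =>
      if PySem.Str.slice t (some i) (some (i + PySem.Str.len p.1)) == p.1
      then max best p.2 else best) b := by
  intro b i
  exact pvFoldl_mono _ (pvStep_mono t i) _ _

-- facts about the keyword table, by computation
lemma pvLevels_le_five : ∀ p ∈ bKeywordLevels, p.2 ≤ 5 := by decide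
lemma pvLevels_four : ∀ p ∈ bKeywordLevels, p.2 ≤ 4 ∨ p.1 ∈ aCriticalKeywords := by decide
lemma pvLevels_three : ∀ p ∈ bKeywordLevels,
    p.2 ≤ 3 ∨ p.1 ∈ aCriticalKeywords ∨ p.1 ∈ aHighKeywords := by decide
lemma pvLevels_two : ∀ p ∈ bKeywordLevels,
    p.2 ≤ 2 ∨ p.1 ∈ aCriticalKeywords ∨ p.1 ∈ aHighKeywords ∨ p.1 ∈ aModerateKeywords := by
  decide
lemma pvCrit_mem : ∀ k ∈ aCriticalKeywords, (k, (5 : Int)) ∈ bKeywordLevels := by decide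
lemma pvHigh_mem : ∀ k ∈ aHighKeywords, (k, (4 : Int)) ∈ bKeywordLevels := by decide
lemma pvMod_mem : ∀ k ∈ aModerateKeywords, (k, (3 : Int)) ∈ bKeywordLevels := by decide
lemma pvCrit_ne : ∀ k ∈ aCriticalKeywords, k.toList ≠ [] := by decide
lemma pvHigh_ne : ∀ k ∈ aHighKeywords, k.toList ≠ [] := by decide
lemma pvMod_ne : ∀ k ∈ aModerateKeywords, k.toList ≠ [] := by decide

-- the B fold is ≤ c, given a per-entry bound on matching entries
lemma pvB_le (t : String) (c : Int) (h2 : 2 ≤ c)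
    (hent : ∀ (i : Int), i ∈ PySem.List.pyRange 0 (PySem.Str.len t) 1 →
      ∀ p ∈ bKeywordLevels,
        (PySem.Str.slice t (some i) (some (i + PySem.Str.len p.1)) == p.1) = true →
        p.2 ≤ c) :
    (PySem.List.pyRange 0 (PySem.Str.len t) 1).foldl (fun best i =>
      bKeywordLevels.foldl (fun best p =>
        if PySem.Str.slice t (some i) (some (i + PySem.Str.len p.1)) == p.1
        then max best p.2 else best) best) 2 ≤ c := by
  refine pvFoldl_le _ c _ 2 ?_ h2
  intro b i hi hb
  refine pvFoldl_le _ c _ b ?_ hb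
  intro b' p hp hb'
  split
  · next hm => exact max_le hb' (hent i hi p hp hm)
  · exact hb'

-- the B fold is ≥ v when some table entry of level ≥ v matches at some position
lemma pvB_ge (t : String) (v : Int) (i : Int)
    (hi : i ∈ PySem.List.pyRange 0 (PySem.Str.len t) 1)
    (p : String × Int) (hp : p ∈ bKeywordLevels) (hv : v ≤ p.2)
    (hm : (PySem.Str.slice t (some i) (some (i + PySem.Str.len p.1)) == p.1) = true) :
    v ≤ (PySem.List.pyRange 0 (PySem.Str.len t) 1).foldl (fun best i =>
      bKeywordLevels.foldl (fun best p =>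
        if PySem.Str.slice t (some i) (some (i + PySem.Str.len p.1)) == p.1
        then max best p.2 else best) best) 2 := by
  refine pvFoldl_ge _ v (pvInner_mono t) _ 2 i hi ?_
  intro b
  refine pvFoldl_ge _ v (pvStep_mono t i) _ b p hp ?_
  intro b'
  rw [if_pos hm]
  exact le_trans hv (le_max_right _ _)

-- ===== VERDICT (by name: the statement is the Claim_ definition above) =====
theorem assess_emergency_level_spec : Claim_equal_assess_emergency_level := by
  intro text _
  simp only [Spec_assess_emergency_level, assess_emergency_level, assess_emergency_level_alt]
  set t := PySem.Str.lower text with ht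
  cases hc : aCriticalKeywords.any (fun keyword => PySem.Str.isIn keyword t) with
  | true =>
    simp only [if_true]
    rcases (pvTier_iff aCriticalKeywords pvCrit_ne t).mp hc with ⟨i, hi, k, hk, hmt⟩
    exact (le_antisymm
      (pvB_le t 5 (by norm_num) (fun i hi p hp _ => pvLevels_le_five p hp))
      (pvB_ge t 5 i hi (k, 5) (pvCrit_mem k hk) le_rfl hmt)).symm
  | false =>
    cases hh : aHighKeywords.any (fun keyword => PySem.Str.isIn keyword t) with
    | true =>
      simp only [Bool.false_eq_true, if_false, if_true]
      rcases (pvTier_iff aHighKeywords pvHigh_ne t).mp hh with ⟨i, hi, k, hk, hmt⟩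
      refine (le_antisymm ?_ (pvB_ge t 4 i hi (k, 4) (pvHigh_mem k hk) le_rfl hmt)).symm
      refine pvB_le t 4 (by norm_num) ?_
      intro i hi p hp hmatch
      rcases pvLevels_four p hp with h | hcm
      · exact h
      · exact absurd ((pvTier_iff aCriticalKeywords pvCrit_ne t).mpr
          ⟨i, hi, p.1, hcm, hmatch⟩) (ne_true_of_eq_false hc)
    | false =>
      cases hm : aModerateKeywords.any (fun keyword => PySem.Str.isIn keyword t) with
      | true =>
        simp only [Bool.false_eq_true, if_false, if_true]
        rcases (pvTier_iff aModerateKeywords pvMod_ne t).mp hm with ⟨i, hi, k, hk, hmt⟩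
        refine (le_antisymm ?_ (pvB_ge t 3 i hi (k, 3) (pvMod_mem k hk) le_rfl hmt)).symm
        refine pvB_le t 3 (by norm_num) ?_
        intro i hi p hp hmatch
        rcases pvLevels_three p hp with h | hcm | hhm
        · exact h
        · exact absurd ((pvTier_iff aCriticalKeywords pvCrit_ne t).mpr
            ⟨i, hi, p.1, hcm, hmatch⟩) (ne_true_of_eq_false hc)
        · exact absurd ((pvTier_iff aHighKeywords pvHigh_ne t).mpr
            ⟨i, hi, p.1, hhm, hmatch⟩) (ne_true_of_eq_false hh)
      | false =>
        simp only [Bool.false_eq_true, if_false]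
        refine (le_antisymm ?_
          (pvFoldl_mono _ (pvInner_mono t) _ 2)).symm
        refine pvB_le t 2 le_rfl ?_
        intro i hi p hp hmatch
        rcases pvLevels_two p hp with h | hcm | hhm | hmm
        · exact h
        · exact absurd ((pvTier_iff aCriticalKeywords pvCrit_ne t).mpr
            ⟨i, hi, p.1, hcm, hmatch⟩) (ne_true_of_eq_false hc)
        · exact absurd ((pvTier_iff aHighKeywords pvHigh_ne t).mpr
            ⟨i, hi, p.1, hhm, hmatch⟩) (ne_true_of_eq_false hh)
        · exact absurd ((pvTier_iff aModerateKeywords pvMod_ne t).mpr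
            ⟨i, hi, p.1, hmm, hmatch⟩) (ne_true_of_eq_false hm)
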